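-- pv_equiv track=rewrite | github.com/Haim02/stocks-finder | app/services/news_alert_engine.py | _detect_catalyst_type
-- ===== SOURCE A (Python) =====
-- CATALYST_KEYWORDS: dict[str, int] = {
--     # High-impact (score 80–95)
--     "fda approval": 90,
--     "fda approved": 90,
--     "fda rejection": 88,
--     "fda rejected": 88,
--     "acquisition": 85,
--     "acquired by": 85,
--     "merger": 82,
--     "takeover": 85,
--     "buyout": 83,
--     "going private": 80,
--     "pentagon contract": 90,
--     "defense contract": 88,
--     "government contract": 82,
--     "dod contract": 88,
--     "short squeeze": 80,
--     "gamma squeeze": 80,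
--     "short interest": 72,
--     # Medium-high (score 65–79)
--     "earnings beat": 75,
--     "beat estimates": 72,
--     "beat expectations": 72,
--     "earnings miss": 73,
--     "missed estimates": 70,
--     "guidance raised": 70,
--     "guidance cut": 70,
--     "raised guidance": 70,
--     "lowered guidance": 70,
--     "analyst upgrade": 68,
--     "upgraded to buy": 70,
--     "upgraded to strong buy": 75,
--     "analyst downgrade": 68,
--     "downgraded to sell": 70,
--     "price target raised": 66,
--     "price target cut": 66,
--     "insider buying": 68,
--     "insider purchase": 66,
--     "ceo bought": 67,
--     "stock buyback": 65,
--     "share repurchase": 65,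
--     # Medium (score 55–65)
--     "partnership": 60,
--     "collaboration": 58,
--     "joint venture": 62,
--     "product launch": 60,
--     "new product": 58,
--     "revenue guidance": 62,
--     "clinical trial": 65,
--     "phase 3": 68,
--     "phase 2": 62,
--     "data breach": 65,
--     "sec investigation": 70,
--     "doj investigation": 70,
--     "class action": 65,
--     "recall": 62,
-- }
--
-- def _detect_catalyst_type(text: str) -> tuple[str, int]:
--     """Returns (catalyst_type, score). Higher score = stronger catalyst."""
--     text_lower = text.lower()
--     best_type = "general"
--     best_score = 0
--
--     for keyword, score in CATALYST_KEYWORDS.items():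
--         if keyword in text_lower and score > best_score:
--             best_score = score
--             best_type = keyword
--
--     return best_type, best_score
-- ===== SOURCE B (Python) =====
-- # Catalyst keyword groups, strongest first: (score, '|'-joined keywords).
-- # Within a group the keywords keep the original table's order.
-- _CATALYST_GROUPS: list[tuple[int, str]] = [
--     (90, "fda approval|fda approved|pentagon contract"),
--     (88, "fda rejection|fda rejected|defense contract|dod contract"),
--     (85, "acquisition|acquired by|takeover"),
--     (83, "buyout"),
--     (82, "merger|government contract"),
--     (80, "going private|short squeeze|gamma squeeze"),
--     (75, "earnings beat|upgraded to strong buy"),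
--     (73, "earnings miss"),
--     (72, "short interest|beat estimates|beat expectations"),
--     (70, "missed estimates|guidance raised|guidance cut|raised guidance|lowered guidance|upgraded to buy|downgraded to sell|sec investigation|doj investigation"),
--     (68, "analyst upgrade|analyst downgrade|insider buying|phase 3"),
--     (67, "ceo bought"),
--     (66, "price target raised|price target cut|insider purchase"),
--     (65, "stock buyback|share repurchase|clinical trial|data breach|class action"),
--     (62, "joint venture|revenue guidance|phase 2|recall"),
--     (60, "partnership|product launch"),
--     (58, "collaboration|new product"),
-- ]
--
--
-- def _detect_catalyst_type(text: str) -> tuple[str, int]: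
--     """Returns (catalyst_type, score). Higher score = stronger catalyst."""
--     text_lower = text.lower()
--     for score, keywords in _CATALYST_GROUPS:
--         for keyword in keywords.split("|"):
--             if keyword in text_lower:
--                 return keyword, score
--     return "general", 0
-- ===== Notes on version B (the rewrite author's own statement) =====
-- stated objective: alternative
-- what changed: A scans the whole keyword dict keeping a strict running max; B restructures the table into score-descending keyword groups (ties keep the original table order) and returns the first substring match, short-circuiting.
import Mathlib
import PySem

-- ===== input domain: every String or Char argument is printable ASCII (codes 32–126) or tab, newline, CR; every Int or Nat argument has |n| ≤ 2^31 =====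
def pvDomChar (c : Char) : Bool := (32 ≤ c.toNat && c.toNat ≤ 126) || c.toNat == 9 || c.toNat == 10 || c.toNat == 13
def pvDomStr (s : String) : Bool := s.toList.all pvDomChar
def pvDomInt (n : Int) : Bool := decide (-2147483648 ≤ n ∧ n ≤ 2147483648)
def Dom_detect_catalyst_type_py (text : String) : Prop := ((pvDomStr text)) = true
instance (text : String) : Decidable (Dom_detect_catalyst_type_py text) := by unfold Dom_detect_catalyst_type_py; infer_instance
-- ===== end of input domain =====

-- B replaces A's full strict-max scan of the keyword dict by a table restructured
-- into score-descending keyword groups (ties keep the dict's insertion order)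
-- and returns the first substring match, short-circuiting; objective: alternative.

-- ===== PORT A =====
-- the module-level dict CATALYST_KEYWORDS (distinct keys, insertion order)
def catalystKeywords : List (String × Int) := [
  ("fda approval", 90),
  ("fda approved", 90),
  ("fda rejection", 88),
  ("fda rejected", 88),
  ("acquisition", 85),
  ("acquired by", 85),
  ("merger", 82),
  ("takeover", 85),
  ("buyout", 83),
  ("going private", 80),
  ("pentagon contract", 90),
  ("defense contract", 88),
  ("government contract", 82),
  ("dod contract", 88),
  ("short squeeze", 80),
  ("gamma squeeze", 80),
  ("short interest", 72),
  ("earnings beat", 75),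
  ("beat estimates", 72),
  ("beat expectations", 72),
  ("earnings miss", 73),
  ("missed estimates", 70),
  ("guidance raised", 70),
  ("guidance cut", 70),
  ("raised guidance", 70),
  ("lowered guidance", 70),
  ("analyst upgrade", 68),
  ("upgraded to buy", 70),
  ("upgraded to strong buy", 75),
  ("analyst downgrade", 68),
  ("downgraded to sell", 70),
  ("price target raised", 66),
  ("price target cut", 66),
  ("insider buying", 68),
  ("insider purchase", 66),
  ("ceo bought", 67),
  ("stock buyback", 65),
  ("share repurchase", 65),
  ("partnership", 60),
  ("collaboration", 58),
  ("joint venture", 62),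
  ("product launch", 60),
  ("new product", 58),
  ("revenue guidance", 62),
  ("clinical trial", 65),
  ("phase 3", 68),
  ("phase 2", 62),
  ("data breach", 65),
  ("sec investigation", 70),
  ("doj investigation", 70),
  ("class action", 65),
  ("recall", 62)]

def detect_catalyst_type_py (text : String) : String × Int :=
  let text_lower := PySem.Str.lower text
  catalystKeywords.foldl
    (fun best kv =>
      if PySem.Str.isIn kv.1 text_lower && decide (best.2 < kv.2) then kv else best)
    ("general", 0)

-- ===== PORT B =====
-- the module-level table _CATALYST_GROUPS: (score, joined keywords), strongest first
def catalystGroups : List (Int × String) := [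
  (90, "fda approval|fda approved|pentagon contract"),
  (88, "fda rejection|fda rejected|defense contract|dod contract"),
  (85, "acquisition|acquired by|takeover"),
  (83, "buyout"),
  (82, "merger|government contract"),
  (80, "going private|short squeeze|gamma squeeze"),
  (75, "earnings beat|upgraded to strong buy"),
  (73, "earnings miss"),
  (72, "short interest|beat estimates|beat expectations"),
  (70, "missed estimates|guidance raised|guidance cut|raised guidance|lowered guidance|upgraded to buy|downgraded to sell|sec investigation|doj investigation"),
  (68, "analyst upgrade|analyst downgrade|insider buying|phase 3"),
  (67, "ceo bought"),
  (66, "price target raised|price target cut|insider purchase"),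
  (65, "stock buyback|share repurchase|clinical trial|data breach|class action"),
  (62, "joint venture|revenue guidance|phase 2|recall"),
  (60, "partnership|product launch"),
  (58, "collaboration|new product")]

-- inner loop: 'for keyword in keywords.split(...): if keyword in text_lower: return …'
def scanGroup (text_lower : String) (score : Int) : List String → Option (String × Int)
  | [] => none
  | kw :: rest =>
    if PySem.Str.isIn kw text_lower then some (kw, score) else scanGroup text_lower score rest

-- outer loop over the groups, falling through to ("general", 0)
def scanGroups (text_lower : String) : List (Int × String) → String × Int
  | [] => ("general", 0)
  | g :: rest =>
    match scanGroup text_lower g.1 ((PySem.Str.split? g.2 "|").getD []) with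
    | some r => r
    | none => scanGroups text_lower rest

def detect_catalyst_type_py_alt (text : String) : String × Int :=
  let text_lower := PySem.Str.lower text
  scanGroups text_lower catalystGroups

-- ===== PRECONDITION & SPEC =====
def Spec_detect_catalyst_type_py (text : String) (out : String × Int) : Prop := out = detect_catalyst_type_py_alt text
instance (text : String) (out : String × Int) : Decidable (Spec_detect_catalyst_type_py text out) := by unfold Spec_detect_catalyst_type_py; infer_instance

-- ===== CLAIM (what is proved, stated in full; the proofs are below) =====
def Claim_equal_detect_catalyst_type_py : Prop := ∀ (text : String), Dom_detect_catalyst_type_py text → Spec_detect_catalyst_type_py text (detect_catalyst_type_py text)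

-- ===== LEMMAS AND PROOFS =====

-- proof-side stable descending insertion sort (structural handle on the sorted list)
def pvIns (x : String × Int) : List (String × Int) → List (String × Int)
  | [] => [x]
  | y :: S => if y.2 ≤ x.2 then x :: y :: S else y :: pvIns x S

def pvIsort : List (String × Int) → List (String × Int)
  | [] => []
  | x :: L => pvIns x (pvIsort L)

-- B's table, expanded back to a flat (keyword, score) list
def pvExpand (G : List (Int × String)) : List (String × Int) :=
  G.flatMap (fun g => ((PySem.Str.split? g.2 "|").getD []).map (fun kw => (kw, g.1)))

theorem mem_pvIns (z x : String × Int) (S : List (String × Int)) :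
    z ∈ pvIns x S ↔ z = x ∨ z ∈ S := by
  induction S with
  | nil => simp [pvIns]
  | cons y S ih =>
    by_cases hle : y.2 ≤ x.2
    · simp [pvIns, hle]
    · simp only [pvIns, if_neg hle, List.mem_cons, ih]
      tauto

theorem pvIns_pairwise (x : String × Int) (S : List (String × Int))
    (h : S.Pairwise (fun a b => b.2 ≤ a.2)) :
    (pvIns x S).Pairwise (fun a b => b.2 ≤ a.2) := by
  induction S with
  | nil => simp [pvIns]
  | cons y S ih =>
    rcases List.pairwise_cons.1 h with ⟨hy, hS⟩
    by_cases hle : y.2 ≤ x.2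
    · simp only [pvIns, if_pos hle]
      refine List.pairwise_cons.2 ⟨?_, h⟩
      intro z hz
      rcases List.mem_cons.1 hz with rfl | hz'
      · omega
      · exact le_trans (hy z hz') hle
    · simp only [pvIns, if_neg hle]
      refine List.pairwise_cons.2 ⟨?_, ih hS⟩
      intro z hz
      rcases (mem_pvIns z x S).1 hz with rfl | hz'
      · omega
      · exact hy z hz'

theorem pvIsort_pairwise (L : List (String × Int)) :
    (pvIsort L).Pairwise (fun a b => b.2 ≤ a.2) := by
  induction L with
  | nil => simp [pvIsort]
  | cons x L ih => exact pvIns_pairwise x _ ih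

theorem find?_congr_mem {α : Type} (S : List α) (f g : α → Bool)
    (h : ∀ z ∈ S, f z = g z) : S.find? f = S.find? g := by
  induction S with
  | nil => rfl
  | cons y S ih =>
    simp only [List.find?]
    rw [h y (by simp)]
    cases hg : g y
    · simpa using ih (fun z hz => h z (List.mem_cons_of_mem _ hz))
    · rfl

theorem find?_none_of_le (p : String × Int → Bool) (c : Int) (S : List (String × Int))
    (h : ∀ z ∈ S, z.2 ≤ c) :
    S.find? (fun kv => p kv && decide (c < kv.2)) = none := by
  apply List.find?_eq_none.2
  intro z hz
  have := h z hz
  simp [not_lt.2 this]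

theorem find?_pvIns_of_false (q : String × Int → Bool) (x : String × Int)
    (S : List (String × Int)) (hx : q x = false) :
    (pvIns x S).find? q = S.find? q := by
  induction S with
  | nil => simp [pvIns, List.find?, hx]
  | cons y S ih =>
    by_cases hle : y.2 ≤ x.2
    · simp [pvIns, if_pos hle, List.find?, hx]
    · simp only [pvIns, if_neg hle, List.find?]
      cases hq : q y
      · simpa using ih
      · rfl

theorem find?_pvIns_of_true (p : String × Int → Bool) (b x : String × Int)
    (S : List (String × Int)) (hS : S.Pairwise (fun a b => b.2 ≤ a.2))
    (hpx : p x = true) (hbx : b.2 < x.2) :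
    ((pvIns x S).find? (fun kv => p kv && decide (b.2 < kv.2))).getD b
      = (S.find? (fun kv => p kv && decide (x.2 < kv.2))).getD x := by
  have h1 : (p x && decide (b.2 < x.2)) = true := by simp [hpx, hbx]
  induction S with
  | nil => simp [pvIns, List.find?, h1]
  | cons y S ih =>
    rcases List.pairwise_cons.1 hS with ⟨hy, hS'⟩
    by_cases hle : y.2 ≤ x.2
    · have h2 : (p y && decide (x.2 < y.2)) = false := by simp [not_lt.2 hle]
      simp only [pvIns, if_pos hle, List.find?, h1, h2,
        find?_none_of_le p x.2 S (fun z hz => le_trans (hy z hz) hle)]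
      rfl
    · rw [not_le] at hle
      have hby : (decide (b.2 < y.2)) = true := by simp; omega
      have hxy : (decide (x.2 < y.2)) = true := by simp [hle]
      simp only [pvIns, if_neg (not_le.2 hle), List.find?, hby, hxy, Bool.and_true]
      cases hp : p y
      · simpa using ih hS'
      · rfl

theorem foldl_eq_find?_isort (p : String × Int → Bool) (L : List (String × Int)) :
    ∀ b, L.foldl (fun best kv => if p kv && decide (best.2 < kv.2) then kv else best) b
      = ((pvIsort L).find? (fun kv => p kv && decide (b.2 < kv.2))).getD b := by
  induction L with
  | nil => intro b; simp [pvIsort]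
  | cons x L ih =>
    intro b
    simp only [List.foldl_cons, pvIsort]
    by_cases hx : (p x && decide (b.2 < x.2)) = true
    · rw [if_pos hx, ih x]
      have hx' : p x = true ∧ b.2 < x.2 := by simpa using hx
      exact (find?_pvIns_of_true p b x (pvIsort L) (pvIsort_pairwise L) hx'.1 hx'.2).symm
    · rw [if_neg hx, ih b, find?_pvIns_of_false _ x _ (by simpa using hx)]

set_option maxRecDepth 8192 in
theorem expand_eq_isort : pvExpand catalystGroups = pvIsort catalystKeywords := by decide

theorem scores_pos : ∀ kv ∈ pvIsort catalystKeywords, (0 : Int) < kv.2 := by decide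

theorem scanGroup_eq_find? (tl : String) (score : Int) (kws : List String) :
    scanGroup tl score kws
      = (kws.map (fun kw => (kw, score))).find? (fun kv => PySem.Str.isIn kv.1 tl) := by
  induction kws with
  | nil => rfl
  | cons kw kws ih =>
    simp only [scanGroup, List.map_cons, List.find?]
    cases h : PySem.Str.isIn kw tl
    · simpa using ih
    · simp [h]

theorem scanGroups_eq_find? (tl : String) (G : List (Int × String)) :
    scanGroups tl G
      = ((pvExpand G).find? (fun kv => PySem.Str.isIn kv.1 tl)).getD ("general", 0) := by
  induction G with
  | nil => rfl
  | cons g G ih =>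
    have he : pvExpand (g :: G)
        = (((PySem.Str.split? g.2 "|").getD []).map (fun kw => (kw, g.1))) ++ pvExpand G := by
      rw [pvExpand, List.flatMap_cons]; rfl
    rw [scanGroups, scanGroup_eq_find? tl g.1, he, List.find?_append]
    cases h : List.find? (fun kv => PySem.Str.isIn kv.1 tl)
        (((PySem.Str.split? g.2 "|").getD []).map (fun kw => (kw, g.1))) with
    | none => simpa using ih
    | some r => rfl

-- ===== VERDICT (by name: the statement is the Claim_ definition above) =====
theorem detect_catalyst_type_py_spec : Claim_equal_detect_catalyst_type_py := by
  intro text _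
  unfold Spec_detect_catalyst_type_py detect_catalyst_type_py detect_catalyst_type_py_alt
  set tl := PySem.Str.lower text with htl
  rw [foldl_eq_find?_isort (fun kv => PySem.Str.isIn kv.1 tl) catalystKeywords ("general", 0),
      scanGroups_eq_find?, expand_eq_isort]
  congr 1
  apply find?_congr_mem
  intro z hz
  simp [scores_pos z hz]
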